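-- pv_equiv track=rewrite | github.com/rmarnold/logparse_rs | bindings/python/python/logparse_rs/rust_accel.py | _py_split_fields
-- ===== SOURCE A (Python) =====
-- from typing import Optional, Tuple, List, Dict, Iterable, Iterator
--
-- def _py_split_fields(line: str) -> List[str]:
--     # Reuse extractor to split all fields
--     fields: List[str] = []
--     i = 0
--     n = len(line)
--     while True:
--         if i >= n:
--             # Handle potential trailing comma -> empty field
--             if n > 0 and line.endswith(','):
--                 fields.append("")
--             break
--         # Extract next field by scanning similar to _py_extract_field
--         if line[i] == '"':
--             i += 1
--             field_chars = []
--             while i < n: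
--                 ch = line[i]
--                 if ch == '"':
--                     if i + 1 < n and line[i + 1] == '"':
--                         field_chars.append('"')
--                         i += 2
--                         continue
--                     i += 1
--                     break
--                 field_chars.append(ch)
--                 i += 1
--             while i < n and line[i] != ',':
--                 i += 1
--             fields.append(''.join(field_chars))
--         else:
--             field_chars = []
--             while i < n and line[i] != ',':
--                 field_chars.append(line[i])
--                 i += 1
--             fields.append(''.join(field_chars))
--         if i < n and line[i] == ',':
--             i += 1
--     return fields
-- ===== SOURCE B (Python) =====
-- from typing import List
--
--
-- def _decode_field(raw: str) -> str:
--     # Decode one raw field: a quoted field keeps the text up to the matching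
--     # closing quote, with '""' un-doubled; anything else is verbatim.
--     if not raw.startswith('"'):
--         return raw
--     out = []
--     i = 1
--     n = len(raw)
--     while i < n:
--         ch = raw[i]
--         if ch == '"':
--             if i + 1 < n and raw[i + 1] == '"':
--                 out.append('"')
--                 i += 2
--                 continue
--             break
--         out.append(ch)
--         i += 1
--     return ''.join(out)
--
--
-- def _py_split_fields(line: str) -> List[str]:
--     # Phase 1: one flat scan splitting the line at commas outside quotes
--     # (quote mode starts only at a field start); phase 2: decode each raw field.
--     if not line:
--         return []
--     raws: List[str] = []
--     cur: List[str] = []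
--     in_q = False
--     at_start = True
--     i = 0
--     n = len(line)
--     while i < n:
--         ch = line[i]
--         if in_q:
--             if ch == '"':
--                 if i + 1 < n and line[i + 1] == '"':
--                     cur.append('"')
--                     cur.append('"')
--                     i += 2
--                     continue
--                 in_q = False
--             cur.append(ch)
--             i += 1
--         elif ch == ',':
--             raws.append(''.join(cur))
--             cur = []
--             at_start = True
--             i += 1
--         else:
--             if at_start and ch == '"':
--                 in_q = True
--             cur.append(ch)
--             at_start = False
--             i += 1
--     if cur:
--         raws.append(''.join(cur))
--     if line.endswith(','):
--         raws.append('')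
--     return [_decode_field(f) for f in raws]
-- ===== Notes on version B (the rewrite author's own statement) =====
-- stated objective: alternative
-- what changed: A extracts fields one at a time with an outer loop and three per-field inner scans (quoted scan, skip-to-comma, unquoted scan); B does one flat quote-aware scan that splits the line into raw field substrings and then decodes each raw field separately (strip/undouble quotes, drop text after the closing quote).
import Mathlib
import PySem

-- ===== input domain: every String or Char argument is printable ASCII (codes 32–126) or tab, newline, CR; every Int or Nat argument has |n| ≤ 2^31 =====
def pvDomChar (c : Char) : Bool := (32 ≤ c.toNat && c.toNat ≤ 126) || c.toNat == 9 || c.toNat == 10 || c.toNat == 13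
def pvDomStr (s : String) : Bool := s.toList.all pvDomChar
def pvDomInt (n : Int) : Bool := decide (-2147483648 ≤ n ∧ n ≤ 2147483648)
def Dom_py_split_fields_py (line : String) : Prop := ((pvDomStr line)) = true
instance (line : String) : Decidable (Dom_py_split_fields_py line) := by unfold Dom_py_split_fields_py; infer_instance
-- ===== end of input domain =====

-- B replaces A's per-field extraction (outer loop + three inner scans) by one flat
-- quote-aware split into raw fields followed by a separate decode of each raw field
-- (alternative decomposition, same O(n) cost).

-- ===== PORT A =====

-- inner quoted scan of A: returns (field_chars, remaining input after the closing quote)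
def quotedA : List Char → List Char × List Char
  | [] => ([], [])
  | '"' :: '"' :: t => ('"' :: (quotedA t).1, (quotedA t).2)
  | '"' :: rest => ([], rest)
  | c :: t => (c :: (quotedA t).1, (quotedA t).2)

lemma quotedA_snd_len : ∀ t : List Char, (quotedA t).2.length ≤ t.length := by
  intro t
  fun_induction quotedA t <;> simp_all <;> omega

lemma dropWhile_comma_head (s : List Char) :
    (s.dropWhile (· ≠ ',')).head? = some ',' ∨ s.dropWhile (· ≠ ',') = [] := by
  induction s with
  | nil => right; rfl
  | cons c s ih =>
    by_cases hc : c = ','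
    · left; subst hc; simp [List.dropWhile]
    · simpa [List.dropWhile, hc] using ih

-- termination helper for loopA, cited by decreasing_by
lemma loopA_dec (c : Char) (t s : List Char) (hs : s.length ≤ t.length + 1)
    (h : s.head? = some ',' ∨ s.length ≤ t.length) :
    (if _h : s.head? = some ',' then s.tail else s).length < (c :: t).length := by
  simp only [List.length_cons]
  split
  · have h0 : s ≠ [] := by rintro rfl; simp_all
    have h1 := List.length_tail (l := s)
    have h2 : 0 < s.length := List.length_pos_of_ne_nil h0
    omega
  · rcases h with h | h
    · exact absurd h ‹_›
    · omega

-- A's outer while-True loop, scanning the remaining suffix of the line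
def loopA (line : String) : List Char → List String
  | [] => if line ≠ "" ∧ PySem.Str.endswith line "," then [""] else []
  | c :: t =>
    if c = '"' then
      String.ofList (quotedA t).1 ::
        loopA line
          (if _h : (((quotedA t).2).dropWhile (· ≠ ',')).head? = some ',' then
            (((quotedA t).2).dropWhile (· ≠ ',')).tail
          else ((quotedA t).2).dropWhile (· ≠ ','))
    else
      String.ofList ((c :: t).takeWhile (· ≠ ',')) ::
        loopA line
          (if _h : ((c :: t).dropWhile (· ≠ ',')).head? = some ',' then
            ((c :: t).dropWhile (· ≠ ',')).tail
          else (c :: t).dropWhile (· ≠ ','))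
termination_by rest => rest.length
decreasing_by
  · exact loopA_dec c t _
      (le_trans (List.length_dropWhile_le _ _) (by have := quotedA_snd_len t; omega))
      (Or.inr (le_trans (List.length_dropWhile_le _ _) (quotedA_snd_len t)))
  · refine loopA_dec c t _ (List.length_dropWhile_le _ _) ?_
    rcases dropWhile_comma_head (c :: t) with h | h
    · exact Or.inl h
    · right; rw [h]; simp
def py_split_fields_py (line : String) : List String := loopA line line.toList

-- ===== PORT B =====

-- phase 1 of B: one flat scan splitting the line at commas outside quotes
def rawB : List Char → Bool → Bool → List Char → List (List Char)
  | [], _, _, cur => if cur = [] then [] else [cur]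
  | '"' :: '"' :: t, true, _, cur => rawB t true false (cur ++ ['"', '"'])
  | '"' :: t, true, _, cur => rawB t false false (cur ++ ['"'])
  | c :: t, true, _, cur => rawB t true false (cur ++ [c])
  | c :: t, false, atStart, cur =>
    if c = ',' then cur :: rawB t false true []
    else rawB t (atStart && c == '"') false (cur ++ [c])

-- phase 2 of B: decode the interior of a quoted raw field
def decodeCore : List Char → List Char
  | [] => []
  | '"' :: '"' :: t => '"' :: decodeCore t
  | '"' :: _ => []
  | c :: t => c :: decodeCore t

def decB (f : List Char) : String :=
  match f with
  | '"' :: t => String.ofList (decodeCore t)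
  | _ => String.ofList f

def py_split_fields_py_alt (line : String) : List String :=
  if line = "" then []
  else
    ((rawB line.toList false true []) ++
        (if PySem.Str.endswith line "," then [[]] else [])).map decB

-- ===== PRECONDITION & SPEC =====
def Spec_py_split_fields_py (line : String) (out : List String) : Prop := out = py_split_fields_py_alt line
instance (line : String) (out : List String) : Decidable (Spec_py_split_fields_py line out) := by unfold Spec_py_split_fields_py; infer_instance

-- ===== CLAIM (what is proved, stated in full; the proofs are below) =====
def Claim_equal_py_split_fields_py : Prop := ∀ (line : String), Dom_py_split_fields_py line → Spec_py_split_fields_py line (py_split_fields_py line)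

-- ===== LEMMAS AND PROOFS =====

-- the chars A's quoted scan consumes, verbatim (including quotes)
def consQ : List Char → List Char
  | [] => []
  | '"' :: '"' :: t => '"' :: '"' :: consQ t
  | '"' :: _ => ['"']
  | c :: t => c :: consQ t

lemma rawB_inq : ∀ (t cur : List Char),
    rawB t true false cur = rawB (quotedA t).2 false false (cur ++ consQ t) := by
  intro t
  fun_induction consQ t with
  | case1 => intro cur; simp [rawB, quotedA]
  | case2 t ih =>
    intro cur
    simp only [rawB, quotedA, ih, List.append_assoc]
    rfl
  | case3 rest h =>
    intro cur
    cases rest with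
    | nil => simp [rawB, quotedA]
    | cons d r =>
      simp [rawB, quotedA]
  | case4 c t h1 h2 ih =>
    intro cur
    simp [rawB, quotedA, ih]

lemma decodeCore_consQ : ∀ t : List Char,
    decodeCore (consQ t ++ (quotedA t).2.takeWhile (· ≠ ',')) = (quotedA t).1 := by
  intro t
  fun_induction consQ t with
  | case1 => simp [decodeCore, quotedA]
  | case2 t ih => simp_all [decodeCore, quotedA]
  | case3 rest h =>
    cases rest with
    | nil => simp [decodeCore, quotedA]
    | cons d r =>
      have hd : d ≠ '"' := fun hh => h r (by rw [hh])
      by_cases hdc : d = ','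
      · simp [decodeCore, quotedA, hdc]
      · simp [decodeCore, quotedA, hd, hdc]
  | case4 c t h1 h2 ih => simp_all [decodeCore, quotedA]

lemma rawB_skip : ∀ (s cur : List Char),
    rawB s false false cur =
      rawB (s.dropWhile (· ≠ ',')) false false (cur ++ s.takeWhile (· ≠ ',')) := by
  intro s
  induction s with
  | nil => intro cur; simp [List.dropWhile, List.takeWhile]
  | cons c s ih =>
    intro cur
    by_cases hc : c = ','
    · subst hc; simp [List.dropWhile, List.takeWhile]
    · have hstep : rawB (c :: s) false false cur = rawB s false false (cur ++ [c]) := by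
        simp [rawB, hc]
      rw [hstep, ih (cur ++ [c])]
      simp [List.dropWhile, List.takeWhile, hc, List.append_assoc]

lemma decB_not_quote (c : Char) (l : List Char) (h : c ≠ '"') :
    decB (c :: l) = String.ofList (c :: l) := by
  rw [decB.eq_def]
  split
  · rename_i t heq
    have hc : c = '"' := by injection heq
    exact absurd hc h
  · rfl

lemma loopA_nil (line : String) :
    loopA line [] = (if line ≠ "" ∧ PySem.Str.endswith line "," then [""] else []) := by
  rw [loopA.eq_def]

lemma loopA_quote (line : String) (t : List Char) :
    loopA line ('"' :: t) =
      String.ofList (quotedA t).1 ::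
        loopA line
          (if _h : (((quotedA t).2).dropWhile (· ≠ ',')).head? = some ',' then
            (((quotedA t).2).dropWhile (· ≠ ',')).tail
          else ((quotedA t).2).dropWhile (· ≠ ',')) := by
  rw [loopA.eq_def]
  simp

lemma loopA_other (line : String) (c : Char) (t : List Char) (h : c ≠ '"') :
    loopA line (c :: t) =
      String.ofList ((c :: t).takeWhile (· ≠ ',')) ::
        loopA line
          (if _h : ((c :: t).dropWhile (· ≠ ',')).head? = some ',' then
            ((c :: t).dropWhile (· ≠ ',')).tail
          else (c :: t).dropWhile (· ≠ ',')) := by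
  rw [loopA.eq_def]
  simp [h]

lemma decB_quote (l : List Char) : decB ('"' :: l) = String.ofList (decodeCore l) := rfl

lemma main_lemma (line : String) : ∀ (n : ℕ) (rest : List Char), rest.length ≤ n →
    loopA line rest =
      (rawB rest false true []).map decB ++
        (if line ≠ "" ∧ PySem.Str.endswith line "," then [""] else []) := by
  intro n
  induction n with
  | zero =>
    intro rest hlen
    have : rest = [] := List.length_eq_zero_iff.mp (Nat.le_zero.mp hlen)
    subst this
    simp [loopA_nil, rawB]
  | succ n ih =>
    intro rest hlen
    cases rest with
    | nil => simp [loopA_nil, rawB]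
    | cons c t =>
      by_cases hq : c = '"'
      · subst hq
        rw [loopA_quote]
        have hB : rawB ('"' :: t) false true [] = rawB t true false ['"'] := by
          simp [rawB]
        rw [hB, rawB_inq t ['"'], rawB_skip]
        have hF : (['"'] ++ consQ t) ++ ((quotedA t).2.takeWhile (· ≠ ',')) =
            '"' :: (consQ t ++ (quotedA t).2.takeWhile (· ≠ ',')) := by
          simp
        rw [hF]
        have hrlen : ((quotedA t).2.dropWhile (· ≠ ',')).length ≤ t.length :=
          le_trans (List.length_dropWhile_le _ _) (quotedA_snd_len t)
        rcases dropWhile_comma_head (quotedA t).2 with hh | hh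
        · -- a comma follows the field: both sides consume it and continue
          obtain ⟨r', hr⟩ : ∃ r', (quotedA t).2.dropWhile (· ≠ ',') = ',' :: r' := by
            cases hcase : (quotedA t).2.dropWhile (· ≠ ',') with
            | nil => rw [hcase] at hh; simp at hh
            | cons a r' =>
              rw [hcase] at hh
              simp only [List.head?_cons, Option.some.injEq] at hh
              exact ⟨r', by rw [hh]⟩
          rw [hr]
          simp only [List.head?_cons, reduceDIte, List.tail_cons]
          have hstep : rawB (',' :: r') false false
              ('"' :: (consQ t ++ (quotedA t).2.takeWhile (· ≠ ','))) =
              ('"' :: (consQ t ++ (quotedA t).2.takeWhile (· ≠ ','))) ::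
                rawB r' false true [] := by
            simp [rawB]
          rw [hstep]
          have hr'len : r'.length ≤ n := by
            have := hrlen
            rw [hr] at this
            simp only [List.length_cons] at this ⊢
            simp only [List.length_cons] at hlen
            omega
          rw [List.map_cons, decB_quote, decodeCore_consQ t, ih r' hr'len]
          rfl
        · -- no comma: the line is exhausted after this field
          rw [hh]
          rw [dif_neg (by simp : ¬(([] : List Char).head? = some ','))]
          rw [loopA_nil]
          have hstep : rawB ([] : List Char) false false
              ('"' :: (consQ t ++ (quotedA t).2.takeWhile (· ≠ ','))) =
              [('"' :: (consQ t ++ (quotedA t).2.takeWhile (· ≠ ',')))] := by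
            simp [rawB]
          rw [hstep, List.map_cons, decB_quote, decodeCore_consQ t]
          rfl
      · rw [loopA_other line c t hq]
        by_cases hc : c = ','
        · subst hc
          have h1 : (',' :: t).takeWhile (· ≠ ',') = [] := by simp [List.takeWhile]
          have h2 : (',' :: t).dropWhile (· ≠ ',') = ',' :: t := by simp [List.dropWhile]
          rw [h1, h2]
          simp only [List.head?_cons, reduceDIte, List.tail_cons]
          have hstep : rawB (',' :: t) false true [] = [] :: rawB t false true [] := by
            simp [rawB]
          have htlen : t.length ≤ n := by
            simp only [List.length_cons] at hlen; omega
          rw [hstep, List.map_cons, ih t htlen]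
          rfl
        · have h1 : (c :: t).takeWhile (· ≠ ',') = c :: t.takeWhile (· ≠ ',') := by
            simp [List.takeWhile, hc]
          have h2 : (c :: t).dropWhile (· ≠ ',') = t.dropWhile (· ≠ ',') := by
            simp [List.dropWhile, hc]
          rw [h1, h2]
          have hbe : (c == '"') = false := beq_eq_false_iff_ne.mpr hq
          have hB : rawB (c :: t) false true [] = rawB t false false [c] := by
            simp [rawB, hc, hbe]
          rw [hB, rawB_skip]
          have hrlen : (t.dropWhile (· ≠ ',')).length ≤ t.length :=
            List.length_dropWhile_le _ _
          rcases dropWhile_comma_head t with hh | hh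
          · obtain ⟨r', hr⟩ : ∃ r', t.dropWhile (· ≠ ',') = ',' :: r' := by
              cases hcase : t.dropWhile (· ≠ ',') with
              | nil => rw [hcase] at hh; simp at hh
              | cons a r' =>
                rw [hcase] at hh
                simp only [List.head?_cons, Option.some.injEq] at hh
                exact ⟨r', by rw [hh]⟩
            rw [hr]
            simp only [List.head?_cons, reduceDIte, List.tail_cons]
            have hstep : rawB (',' :: r') false false ([c] ++ t.takeWhile (· ≠ ',')) =
                ([c] ++ t.takeWhile (· ≠ ',')) :: rawB r' false true [] := by
              simp [rawB]
            rw [hstep]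
            have hr'len : r'.length ≤ n := by
              have := hrlen
              rw [hr] at this
              simp only [List.length_cons] at this ⊢
              simp only [List.length_cons] at hlen
              omega
            rw [List.map_cons, ih r' hr'len]
            have : decB ([c] ++ t.takeWhile (· ≠ ',')) =
                String.ofList (c :: t.takeWhile (· ≠ ',')) := decB_not_quote c _ hq
            rw [this]
            rfl
          · rw [hh]
            rw [dif_neg (by simp : ¬(([] : List Char).head? = some ','))]
            rw [loopA_nil]
            have hstep : rawB ([] : List Char) false false ([c] ++ t.takeWhile (· ≠ ',')) =
                [[c] ++ t.takeWhile (· ≠ ',')] := by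
              simp [rawB]
            rw [hstep, List.map_cons]
            have : decB ([c] ++ t.takeWhile (· ≠ ',')) =
                String.ofList (c :: t.takeWhile (· ≠ ',')) := decB_not_quote c _ hq
            rw [this]
            rfl

-- ===== VERDICT (by name: the statement is the Claim_ definition above) =====
theorem py_split_fields_py_spec : Claim_equal_py_split_fields_py := by
  intro line _
  unfold Spec_py_split_fields_py py_split_fields_py py_split_fields_py_alt
  by_cases h : line = ""
  · subst h
    rw [loopA.eq_def]
    simp
  · rw [if_neg h, main_lemma line line.toList.length line.toList le_rfl, List.map_append]
    congr 1
    by_cases he : PySem.Str.endswith line "," = true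
    · rw [if_pos ⟨h, he⟩, if_pos he]
      simp [decB]
    · rw [if_neg (by tauto), if_neg he]
      rfl
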